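-- pv_equiv track=rewrite | github.com/fallon3d/Roster_App | rotation_core/fairness.py | compute_quotas
-- ===== SOURCE A (Python) =====
-- from typing import Dict, List
--
-- def compute_quotas(num_players: int, total_slots: int) -> List[int]:
--     """Minimum guarantee + even distribution remainder."""
--     if num_players <= 0:
--         return []
--     base = total_slots // num_players
--     remainder = total_slots % num_players
--     quotas = [base] * num_players
--     for i in range(remainder):
--         quotas[i] += 1
--     return quotas
-- ===== SOURCE B (Python) =====
-- def compute_quotas(num_players: int, total_slots: int):
--     """Greedy fair split: repeatedly give the next player the ceiling of the
--     remaining slots over the remaining players."""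
--     quotas = []
--     n, t = num_players, total_slots
--     while n > 0:
--         share = -(-t // n)  # ceil(t / n)
--         quotas.append(share)
--         t -= share
--         n -= 1
--     return quotas
-- ===== Notes on version B (the rewrite author's own statement) =====
-- stated objective: alternative
-- what changed: Replaced the global divmod + patch-the-first-remainder-entries construction with a greedy one-pass loop that gives each successive player the ceiling of the remaining slots divided by the remaining players (no global base/remainder computed).
import Mathlib
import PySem

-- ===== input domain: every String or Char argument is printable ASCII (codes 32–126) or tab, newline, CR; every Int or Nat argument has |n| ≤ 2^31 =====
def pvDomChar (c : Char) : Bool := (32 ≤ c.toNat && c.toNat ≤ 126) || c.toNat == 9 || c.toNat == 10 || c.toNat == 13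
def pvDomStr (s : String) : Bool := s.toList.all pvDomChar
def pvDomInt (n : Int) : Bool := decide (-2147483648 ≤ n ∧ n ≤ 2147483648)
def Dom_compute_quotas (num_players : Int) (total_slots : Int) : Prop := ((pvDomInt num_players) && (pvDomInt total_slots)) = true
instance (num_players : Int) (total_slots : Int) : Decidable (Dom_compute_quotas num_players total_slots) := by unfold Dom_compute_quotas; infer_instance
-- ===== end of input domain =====

-- B replaces A's global divmod + patch-first-remainder-entries construction with a greedy loop
-- giving each player the ceiling of remaining slots over remaining players (alternative; same cost).

-- ===== PORT A =====
def compute_quotas (num_players : Int) (total_slots : Int) : List Int :=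
  if num_players ≤ 0 then []
  else
    let base := PySem.Int.floordiv total_slots num_players
    let remainder := PySem.Int.mod total_slots num_players
    -- for i in range(remainder): quotas[i] += 1   (i always in range: 0 ≤ i < remainder < num_players)
    (PySem.List.pyRange 0 remainder 1).foldl
      (fun quotas i => quotas.set i.toNat (quotas.getD i.toNat 0 + 1))
      (List.replicate num_players.toNat base)

-- ===== PORT B =====
-- while n > 0: share = -(-t // n); append; t -= share; n -= 1   (fuel = number of iterations = n.toNat)
def pvGreedy : Nat → Int → Int → List Int
  | 0, _, _ => []
  | Nat.succ k, n, t =>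
    let share := -(PySem.Int.floordiv (-t) n)
    share :: pvGreedy k (n - 1) (t - share)

def compute_quotas_alt (num_players : Int) (total_slots : Int) : List Int :=
  pvGreedy num_players.toNat num_players total_slots

-- ===== PRECONDITION & SPEC =====
def Spec_compute_quotas (num_players : Int) (total_slots : Int) (out : List Int) : Prop := out = compute_quotas_alt num_players total_slots
instance (num_players : Int) (total_slots : Int) (out : List Int) : Decidable (Spec_compute_quotas num_players total_slots out) := by unfold Spec_compute_quotas; infer_instance

-- ===== CLAIM (what is proved, stated in full; the proofs are below) =====
def Claim_equal_compute_quotas : Prop := ∀ (num_players : Int) (total_slots : Int), Dom_compute_quotas num_players total_slots → Spec_compute_quotas num_players total_slots (compute_quotas num_players total_slots)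

-- ===== LEMMAS AND PROOFS =====

-- Incrementing the first r entries of (replicate n b), one at a time, yields the two-segment list.
theorem pv_patch_loop (b : Int) : ∀ (r n : Nat), r ≤ n →
    (List.range r).foldl (fun q i => q.set i (q.getD i 0 + 1)) (List.replicate n b)
      = List.replicate r (b + 1) ++ List.replicate (n - r) b := by
  intro r
  induction r with
  | zero => intro n _; simp
  | succ r ih =>
    intro n h
    rw [List.range_succ, List.foldl_append, ih n (by omega)]
    have hn : n - r = (n - (r + 1)) + 1 := by omega
    rw [hn, List.replicate_succ]
    simp only [List.foldl_cons, List.foldl_nil]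
    rw [List.replicate_succ' (n := r)]
    have hget : (List.replicate r (b + 1) ++ b :: List.replicate (n - (r + 1)) b).getD r 0 = b := by
      simp [List.getD]
    rw [hget]
    rw [List.set_append_right _ _ (by simp)]
    simp

-- The greedy ceiling loop also yields the two-segment list.
theorem pv_greedy_eq : ∀ (k : Nat) (t : Int), 0 < k →
    pvGreedy k (k : Int) t
      = List.replicate (PySem.Int.mod t k).toNat (PySem.Int.floordiv t k + 1)
        ++ List.replicate ((k : Int) - PySem.Int.mod t k).toNat (PySem.Int.floordiv t k) := by
  intro k
  induction k with
  | zero => intro t h; omega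
  | succ k ih =>
    intro t _
    have hcast : ((k + 1 : Nat) : Int) = (k : Int) + 1 := by push_cast; ring
    rw [hcast]
    set K : Int := (k : Int) with hK
    have hn : (0 : Int) < K + 1 := by positivity
    have hb := PySem.Int.floordiv_mul_add_mod t (K + 1)
    have hr0 : 0 ≤ PySem.Int.mod t (K + 1) := PySem.Int.mod_nonneg _ (by omega)
    have hrlt : PySem.Int.mod t (K + 1) < K + 1 := PySem.Int.mod_lt _ (by omega)
    set b := PySem.Int.floordiv t (K + 1) with hbdef
    set r := PySem.Int.mod t (K + 1) with hrdef
    have heq : t = b * K + b + r := by rw [← hb]; ring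
    have hn1 : K + 1 - 1 = K := by ring
    by_cases hrz : r = 0
    · -- exact division: share = b, all remaining get b
      have hs : -(PySem.Int.floordiv (-t) (K + 1)) = b :=
        (PySem.Int.neg_floordiv_neg_eq_iff_of_pos (by omega)).2
          (by constructor <;> nlinarith [heq, hn])
      show pvGreedy (k + 1) (K + 1) t = _
      rw [pvGreedy]
      simp only [hs]
      rcases Nat.eq_zero_or_pos k with hk | hk
      · subst hk
        simp only [pvGreedy]
        rw [hrz]
        have hK0 : K = 0 := by simp [hK]
        rw [hK0]
        norm_num
      · have hkpos : (0 : Int) < K := by omega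
        have hb' : PySem.Int.floordiv (t - b) K = b :=
          (PySem.Int.floordiv_eq_iff_of_pos hkpos).2 (by constructor <;> nlinarith [heq])
        have hr' : PySem.Int.mod (t - b) K = 0 := by
          have h2 := PySem.Int.floordiv_mul_add_mod (t - b) K
          rw [hb'] at h2; nlinarith [heq]
        rw [hn1, ih (t - b) hk, hb', hr', hrz]
        have h1 : ((0 : Int)).toNat = 0 := rfl
        have h2 : (K - 0).toNat = k := by omega
        have h3 : (K + 1 - 0).toNat = k + 1 := by omega
        rw [h1, h2, h3]
        simp [List.replicate_succ]
    · -- r > 0: share = b + 1, recurse with remainder r - 1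
      have hrpos : 0 < r := lt_of_le_of_ne hr0 (Ne.symm hrz)
      have hs : -(PySem.Int.floordiv (-t) (K + 1)) = b + 1 :=
        (PySem.Int.neg_floordiv_neg_eq_iff_of_pos (by omega)).2
          (by constructor <;> nlinarith [heq, hn])
      have hkpos : 0 < k := by omega
      have hkposZ : (0 : Int) < K := by omega
      show pvGreedy (k + 1) (K + 1) t = _
      rw [pvGreedy]
      simp only [hs]
      have hb' : PySem.Int.floordiv (t - (b + 1)) K = b :=
        (PySem.Int.floordiv_eq_iff_of_pos hkposZ).2 (by constructor <;> nlinarith [heq])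
      have hr' : PySem.Int.mod (t - (b + 1)) K = r - 1 := by
        have h2 := PySem.Int.floordiv_mul_add_mod (t - (b + 1)) K
        rw [hb'] at h2; nlinarith [heq]
      rw [hn1, ih (t - (b + 1)) hkpos, hb', hr']
      have h1 : r.toNat = (r - 1).toNat + 1 := by omega
      have h2 : (K + 1 - r).toNat = (K - (r - 1)).toNat := by omega
      rw [h1, h2, List.replicate_succ]
      simp

theorem compute_quotas_eq_alt (num_players total_slots : Int) :
    compute_quotas num_players total_slots = compute_quotas_alt num_players total_slots := by
  unfold compute_quotas compute_quotas_alt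
  split
  · rename_i h
    have hz : num_players.toNat = 0 := by omega
    rw [hz]
    rfl
  · rename_i h
    have hpos : 0 < num_players := by omega
    obtain ⟨m, hm⟩ : ∃ m : Nat, num_players = (m : Int) := ⟨num_players.toNat, by omega⟩
    subst hm
    have hmpos : 0 < m := by exact_mod_cast hpos
    rw [Int.toNat_natCast]
    rw [pv_greedy_eq m total_slots hmpos]
    have hr0 : 0 ≤ PySem.Int.mod total_slots m := PySem.Int.mod_nonneg _ (by omega)
    have hrlt : PySem.Int.mod total_slots m < m := PySem.Int.mod_lt _ (by omega)
    set base := PySem.Int.floordiv total_slots (m : Int) with hbase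
    set r := PySem.Int.mod total_slots (m : Int) with hrdef
    dsimp only []
    rw [PySem.List.pyRange_one, List.foldl_map]
    simp only [zero_add, Int.toNat_natCast]
    have hsub : r.toNat ≤ m := by omega
    have hsub2 : ((m : Int) - r).toNat = m - r.toNat := by omega
    rw [show (r - 0).toNat = r.toNat by omega, hsub2]
    exact pv_patch_loop base r.toNat m hsub

-- ===== VERDICT (by name: the statement is the Claim_ definition above) =====
theorem compute_quotas_spec : Claim_equal_compute_quotas := by
  intro np ts _
  exact compute_quotas_eq_alt np ts
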